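-- pv_equiv track=rewrite | github.com/benprofitt/reiform-mynah | python/impl/services/modules/gap_filling/gap_detection.py | finding_narrow_min_max
-- ===== SOURCE A (Python) =====
-- def finding_narrow_min_max(points, x_value):
--     # Initialize the nearest positive and negative points to None
--     nearest_positive = None
--     nearest_negative = None
--
--     # Iterate through the points
--     for point in points:
--         x, y = point
--
--         # If the x value of the point is closest to v so far and y is positive, update the nearest positive point
--         if y >= 0 and (nearest_positive is None or abs(x - x_value) < abs(nearest_positive[0] - x_value)):
--             nearest_positive = point
--
--         # If the x value of the point is closest to v so far and y is negative, update the nearest negative point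
--         if y < 0 and (nearest_negative is None or abs(x - x_value) < abs(nearest_negative[0] - x_value)):
--             nearest_negative = point
--
--     return nearest_positive, nearest_negative
-- ===== SOURCE B (Python) =====
-- def finding_narrow_min_max(points, x_value):
--     # Sort once by distance to x_value (stable), then take the first point of each sign.
--     by_dist = sorted(points, key=lambda p: abs(p[0] - x_value))
--     nearest_positive = next((p for p in by_dist if p[1] >= 0), None)
--     nearest_negative = next((p for p in by_dist if p[1] < 0), None)
--     return nearest_positive, nearest_negative
-- ===== Notes on version B (the rewrite author's own statement) =====
-- stated objective: alternative
-- what changed: Replaces A's single fused accumulator loop by a stable sort of all points by |x - x_value| followed by taking the first point of each y-sign group from the sorted order (sort-then-scan instead of running minima).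
import Mathlib
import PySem

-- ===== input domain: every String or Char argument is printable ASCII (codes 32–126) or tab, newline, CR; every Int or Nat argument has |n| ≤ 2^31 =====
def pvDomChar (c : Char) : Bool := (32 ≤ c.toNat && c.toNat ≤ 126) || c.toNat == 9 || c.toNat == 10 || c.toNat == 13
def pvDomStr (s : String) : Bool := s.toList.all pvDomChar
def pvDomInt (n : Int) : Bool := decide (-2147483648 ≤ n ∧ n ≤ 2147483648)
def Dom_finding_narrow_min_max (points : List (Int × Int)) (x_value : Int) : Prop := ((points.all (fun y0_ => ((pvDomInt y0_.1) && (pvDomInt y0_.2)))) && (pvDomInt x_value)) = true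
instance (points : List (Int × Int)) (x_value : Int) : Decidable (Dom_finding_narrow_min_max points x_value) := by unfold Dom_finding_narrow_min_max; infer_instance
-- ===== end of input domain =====

-- B replaces A's fused running-minimum loop by a single stable sort of the points by
-- |x - x_value| followed by taking the first point of each y-sign group (objective: alternative).

-- ===== PORT A =====
-- 'if y >= 0 and (nearest_positive is None or abs(x-x_value) < abs(nearest_positive[0]-x_value)): nearest_positive = point'
def pvUpdPos (x_value : Int) (acc : Option (Int × Int)) (point : Int × Int) : Option (Int × Int) :=
  if point.2 ≥ 0 then
    match acc with
    | none => some point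
    | some m => if |point.1 - x_value| < |m.1 - x_value| then some point else some m
  else acc

-- the analogous update for the negative-y accumulator
def pvUpdNeg (x_value : Int) (acc : Option (Int × Int)) (point : Int × Int) : Option (Int × Int) :=
  if point.2 < 0 then
    match acc with
    | none => some point
    | some m => if |point.1 - x_value| < |m.1 - x_value| then some point else some m
  else acc

def finding_narrow_min_max (points : List (Int × Int)) (x_value : Int) : (Option (Int × Int)) × (Option (Int × Int)) :=
  points.foldl (fun acc point => (pvUpdPos x_value acc.1 point, pvUpdNeg x_value acc.2 point)) (none, none)

-- ===== PORT B =====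
-- 'by_dist = sorted(points, key=lambda p: abs(p[0]-x_value))', then
-- 'next((p for p in by_dist if p[1] >= 0), None)' / 'next((p for p in by_dist if p[1] < 0), None)'
def finding_narrow_min_max_alt (points : List (Int × Int)) (x_value : Int) : (Option (Int × Int)) × (Option (Int × Int)) :=
  let by_dist := PySem.List.sorted points (fun p => |p.1 - x_value|) false
  let nearest_positive := by_dist.find? (fun p => decide (p.2 ≥ 0))
  let nearest_negative := by_dist.find? (fun p => decide (p.2 < 0))
  (nearest_positive, nearest_negative)

-- ===== PRECONDITION & SPEC =====
def Spec_finding_narrow_min_max (points : List (Int × Int)) (x_value : Int) (out : (Option (Int × Int)) × (Option (Int × Int))) : Prop := out = finding_narrow_min_max_alt points x_value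
instance (points : List (Int × Int)) (x_value : Int) (out : (Option (Int × Int)) × (Option (Int × Int))) : Decidable (Spec_finding_narrow_min_max points x_value out) := by unfold Spec_finding_narrow_min_max; infer_instance

-- ===== CLAIM (what is proved, stated in full; the proofs are below) =====
def Claim_equal_finding_narrow_min_max : Prop := ∀ (points : List (Int × Int)) (x_value : Int), Dom_finding_narrow_min_max points x_value → Spec_finding_narrow_min_max points x_value (finding_narrow_min_max points x_value)

-- ===== LEMMAS AND PROOFS =====

-- A's first-strict-minimum step, per accumulator
def pvMStep (key : Int × Int → Int) (acc : Option (Int × Int)) (p : Int × Int) : Option (Int × Int) :=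
  match acc with
  | none => some p
  | some m => if key p < key m then some p else some m

lemma updPos_eq (x_value : Int) (acc : Option (Int × Int)) (p : Int × Int) :
    pvUpdPos x_value acc p = if p.2 ≥ 0 then pvMStep (fun q => |q.1 - x_value|) acc p else acc := rfl

lemma updNeg_eq (x_value : Int) (acc : Option (Int × Int)) (p : Int × Int) :
    pvUpdNeg x_value acc p = if p.2 < 0 then pvMStep (fun q => |q.1 - x_value|) acc p else acc := rfl

-- A's fused loop splits into the two filtered folds
lemma fold_split (x_value : Int) (l : List (Int × Int)) (np nn : Option (Int × Int)) :
    l.foldl (fun acc point => (pvUpdPos x_value acc.1 point, pvUpdNeg x_value acc.2 point)) (np, nn)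
    = ((l.filter (fun p => p.2 ≥ 0)).foldl (pvMStep (fun q => |q.1 - x_value|)) np,
       (l.filter (fun p => p.2 < 0)).foldl (pvMStep (fun q => |q.1 - x_value|)) nn) := by
  induction l generalizing np nn with
  | nil => rfl
  | cons p t ih =>
    simp only [List.foldl_cons, List.filter_cons, updPos_eq, updNeg_eq]
    by_cases h : p.2 ≥ 0
    · have h2 : ¬ p.2 < 0 := by omega
      simp only [h, h2, decide_true, decide_false, if_true, if_false]
      exact ih _ _
    · have h2 : p.2 < 0 := by omega
      simp only [h, h2, decide_true, decide_false, if_true, if_false]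
      exact ih _ _

-- inserting x into a key-sorted list and then taking the first q-element
lemma find?_insertBy (key : Int × Int → Int) (q : Int × Int → Bool) (x : Int × Int)
    (l : List (Int × Int)) (hs : l.Pairwise (fun a b => key a ≤ key b)) :
    (PySem.List.insertBy (fun a b => decide (key a < key b)) x l).find? q
    = match l.find? q with
      | none => if q x then some x else none
      | some m => if q x ∧ key x < key m then some x else some m := by
  induction l with
  | nil =>
    simp [PySem.List.insertBy, List.find?]
  | cons y t ih =>
    have hyt : ∀ z ∈ t, key y ≤ key z := (List.pairwise_cons.mp hs).1
    have hst : t.Pairwise (fun a b => key a ≤ key b) := (List.pairwise_cons.mp hs).2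
    by_cases hxy : key x < key y
    · -- x goes in front
      have : PySem.List.insertBy (fun a b => decide (key a < key b)) x (y :: t) = x :: y :: t := by
        simp [PySem.List.insertBy, hxy]
      rcases hm : (y :: t).find? q with _ | m
      · rw [this, List.find?_cons, hm]
        cases hqx : q x <;> simp
      · have hmem : m ∈ y :: t := List.mem_of_find?_eq_some hm
        have hkm : key y ≤ key m := by
          rcases List.mem_cons.mp hmem with h | h
          · simp [h]
          · exact hyt m h
        have hxm : key x < key m := lt_of_lt_of_le hxy hkm
        rw [this, List.find?_cons, hm]
        cases hqx : q x <;> simp [hxm]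
    · -- x is inserted further down; y stays in front
      have : PySem.List.insertBy (fun a b => decide (key a < key b)) x (y :: t)
          = y :: PySem.List.insertBy (fun a b => decide (key a < key b)) x t := by
        simp [PySem.List.insertBy, hxy]
      rw [this]
      cases hqy : q y
      · -- y skipped on both sides
        simp only [List.find?, hqy]
        exact ih hst
      · -- first q-element is y, and x is not strictly closer than y
        rw [List.find?_cons, List.find?_cons]
        simp [hqy, hxy]

-- first q-element of the sorted list = A's first-strict-minimum fold over the q-elements
lemma find?_sorted_eq_fold (key : Int × Int → Int) (q : Int × Int → Bool) (xs : List (Int × Int)) :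
    (PySem.List.sorted xs key false).find? q
    = (xs.filter q).foldl (pvMStep key) none := by
  induction xs using List.reverseRecOn with
  | nil => rfl
  | append_singleton t x ih =>
    have hsorted : PySem.List.sorted (t ++ [x]) key false
        = PySem.List.insertBy (fun a b => decide (key a < key b)) x (PySem.List.sorted t key false) := by
      rw [PySem.List.sorted_eq_foldl_insertBy, PySem.List.sorted_eq_foldl_insertBy,
        List.foldl_append]
      rfl
    rw [hsorted, find?_insertBy key q x _ (PySem.List.sorted_pairwise t key),
      List.filter_append, List.foldl_append, ih]
    cases hqx : q x
    · simp [hqx]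
      cases ((t.filter q).foldl (pvMStep key) none) <;> simp
    · simp only [hqx, List.filter_cons, List.filter_nil, if_true, List.foldl_cons, List.foldl_nil]
      cases hf : ((t.filter q).foldl (pvMStep key) none) with
      | none => simp [pvMStep]
      | some m =>
        by_cases hlt : key x < key m
        · simp [pvMStep, hlt]
        · simp [pvMStep, hlt]

-- ===== VERDICT (by name: the statement is the Claim_ definition above) =====
theorem finding_narrow_min_max_spec : Claim_equal_finding_narrow_min_max := by
  intro points x_value _
  show finding_narrow_min_max points x_value = finding_narrow_min_max_alt points x_value
  rw [finding_narrow_min_max, finding_narrow_min_max_alt, fold_split]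
  rw [find?_sorted_eq_fold (fun q => |q.1 - x_value|) (fun p => decide (p.2 ≥ 0)),
    find?_sorted_eq_fold (fun q => |q.1 - x_value|) (fun p => decide (p.2 < 0))]
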